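-- pv_equiv track=rewrite | github.com/jianghaiping93/publication_figures_creator | scripts/batch_code_availability_scan.py | classify_links
-- ===== SOURCE A (Python) =====
-- from typing import Dict, List, Tuple
--
-- GITHUB_HOSTS = ("github.com", "gitlab.com", "bitbucket.org")
--
-- NON_GITHUB_HOST_HINTS = (
--     "zenodo.org",
--     "figshare.com",
--     "osf.io",
--     "dryad",
--     "datadryad",
--     "synapse.org",
-- )
--
-- def classify_links(links: List[str]) -> Tuple[List[str], List[str]]:
--     github_links = []
--     other_code_links = []
--     for link in links:
--         lower = link.lower()
--         if any(host in lower for host in GITHUB_HOSTS):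
--             github_links.append(link)
--         elif any(hint in lower for hint in NON_GITHUB_HOST_HINTS):
--             other_code_links.append(link)
--     return sorted(set(github_links)), sorted(set(other_code_links))
-- ===== SOURCE B (Python) =====
-- GITHUB_HOSTS = ("github.com", "gitlab.com", "bitbucket.org")
--
-- NON_GITHUB_HOST_HINTS = (
--     "zenodo.org",
--     "figshare.com",
--     "osf.io",
--     "dryad",
--     "datadryad",
--     "synapse.org",
-- )
--
-- # One ordered table: first matching pattern decides the bucket (github patterns first,
-- # so a link matching both kinds still lands in the github bucket, like A's if/elif).
-- PATTERNS = [(host, 0) for host in GITHUB_HOSTS] + [(hint, 1) for hint in NON_GITHUB_HOST_HINTS]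
--
--
-- def _insort_unique(xs, x):
--     """Insert x into the sorted list xs, keeping it sorted and duplicate-free."""
--     i = 0
--     while i < len(xs) and xs[i] < x:
--         i += 1
--     if i == len(xs) or xs[i] != x:
--         xs.insert(i, x)
--
--
-- def classify_links(links):
--     buckets = ([], [])
--     for link in links:
--         lower = link.lower()
--         for pattern, b in PATTERNS:
--             if pattern in lower:
--                 _insort_unique(buckets[b], link)
--                 break
--     return buckets
-- ===== Notes on version B (the rewrite author's own statement) =====
-- stated objective: alternative
-- what changed: B replaces A's append-then-sorted(set(...)) pipeline with a single pass that keeps each bucket sorted and duplicate-free at all times via ordered insertion, and replaces the if/elif any() host tests with a first-match scan over one combined (pattern, bucket) table; a timing run measured B faster because it only pays insertion cost for links that actually match a pattern, while A always sorts and dedups whole buckets at the end.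
import Mathlib
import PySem

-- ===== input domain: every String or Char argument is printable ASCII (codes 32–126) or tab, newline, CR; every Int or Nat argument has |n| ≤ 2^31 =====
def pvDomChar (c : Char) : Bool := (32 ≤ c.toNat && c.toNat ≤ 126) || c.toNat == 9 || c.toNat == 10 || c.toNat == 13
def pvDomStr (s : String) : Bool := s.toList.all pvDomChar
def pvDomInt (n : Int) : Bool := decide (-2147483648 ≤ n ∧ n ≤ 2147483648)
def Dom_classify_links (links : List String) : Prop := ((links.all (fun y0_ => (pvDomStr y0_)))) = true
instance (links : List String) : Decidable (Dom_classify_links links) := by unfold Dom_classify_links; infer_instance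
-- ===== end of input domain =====

-- B keeps each bucket sorted and duplicate-free at all times via ordered insertion
-- during one pass (no sorted()/set()), classifying each link by the first match in a
-- combined (pattern, bucket) table; return values agree with A everywhere.

-- ===== PORT A =====
def ghHosts : List String := ["github.com", "gitlab.com", "bitbucket.org"]
def ngHints : List String :=
  ["zenodo.org", "figshare.com", "osf.io", "dryad", "datadryad", "synapse.org"]

def classify_links (links : List String) : List String × List String :=
  let p := links.foldl (fun (acc : List String × List String) link =>
    let lower := PySem.Str.lower link
    if ghHosts.any (fun host => PySem.Str.isIn host lower) then (acc.1 ++ [link], acc.2)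
    else if ngHints.any (fun hint => PySem.Str.isIn hint lower) then (acc.1, acc.2 ++ [link])
    else acc) ([], [])
  (PySem.List.sorted (PySem.Set.ofList p.1) (fun x => x) false,
   PySem.List.sorted (PySem.Set.ofList p.2) (fun x => x) false)

-- ===== PORT B =====
def patternsB : List (String × Int) :=
  [("github.com", 0), ("gitlab.com", 0), ("bitbucket.org", 0),
   ("zenodo.org", 1), ("figshare.com", 1), ("osf.io", 1),
   ("dryad", 1), ("datadryad", 1), ("synapse.org", 1)]

-- _insort_unique: walk past smaller elements; insert unless already present
def insortUnique (xs : List String) (x : String) : List String :=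
  match xs with
  | [] => [x]
  | y :: ys =>
    if y < x then y :: insortUnique ys x
    else if y ≠ x then x :: y :: ys
    else y :: ys

def classify_links_alt (links : List String) : List String × List String :=
  links.foldl (fun (buckets : List String × List String) link =>
    let lower := PySem.Str.lower link
    match patternsB.find? (fun pb => PySem.Str.isIn pb.1 lower) with
    | some (_, b) =>
        if b == 0 then (insortUnique buckets.1 link, buckets.2)
        else (buckets.1, insortUnique buckets.2 link)
    | none => buckets) ([], [])

-- ===== PRECONDITION & SPEC =====
def Spec_classify_links (links : List String) (out : List String × List String) : Prop := out = classify_links_alt links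
instance (links : List String) (out : List String × List String) : Decidable (Spec_classify_links links out) := by unfold Spec_classify_links; infer_instance

-- ===== CLAIM (what is proved, stated in full; the proofs are below) =====
def Claim_equal_classify_links : Prop := ∀ (links : List String), Dom_classify_links links → Spec_classify_links links (classify_links links)

-- ===== LEMMAS AND PROOFS =====

def ghB (link : String) : Bool := ghHosts.any (fun host => PySem.Str.isIn host (PySem.Str.lower link))
def ngB (link : String) : Bool := ngHints.any (fun hint => PySem.Str.isIn hint (PySem.Str.lower link))

theorem patternsB_eq :
    patternsB = ghHosts.map (fun s => (s, (0:Int))) ++ ngHints.map (fun s => (s, (1:Int))) := rfl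

-- first match in a tagged table, by tag
theorem find_tag (p : String → Bool) (gs ns : List String) :
    ((gs.map (fun s => (s, (0:Int))) ++ ns.map (fun s => (s, (1:Int)))).find?
        (fun pb => p pb.1)).map Prod.snd
      = if gs.any p then some 0 else if ns.any p then some 1 else none := by
  induction gs with
  | nil =>
    simp only [List.map_nil, List.nil_append, List.any_nil, Bool.false_eq_true, if_false]
    induction ns with
    | nil => simp
    | cons y ys ihn =>
      simp only [List.map_cons, List.any_cons]
      by_cases hp : p y = true
      · rw [List.find?_cons_of_pos (by simpa using hp)]
        simp [hp]
      · rw [List.find?_cons_of_neg (by simpa using hp)]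
        simp only [Bool.not_eq_true] at hp
        simp only [hp, Bool.false_or]
        exact ihn
  | cons x xs ihg =>
    simp only [List.map_cons, List.cons_append, List.any_cons]
    by_cases hp : p x = true
    · rw [List.find?_cons_of_pos (by simpa using hp)]
      simp [hp]
    · rw [List.find?_cons_of_neg (by simpa using hp)]
      simp only [Bool.not_eq_true] at hp
      simp only [hp, Bool.false_or]
      exact ihg

-- B's first-match table scan = A's if/elif any() tests
theorem stepB_eq :
    (fun (buckets : List String × List String) link =>
      let lower := PySem.Str.lower link
      match patternsB.find? (fun pb => PySem.Str.isIn pb.1 lower) with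
      | some (_, b) =>
          if b == 0 then (insortUnique buckets.1 link, buckets.2)
          else (buckets.1, insortUnique buckets.2 link)
      | none => buckets)
    = (fun (buckets : List String × List String) link =>
      if ghB link then (insortUnique buckets.1 link, buckets.2)
      else if ngB link then (buckets.1, insortUnique buckets.2 link)
      else buckets) := by
  funext buckets link
  have h := find_tag (fun s => PySem.Str.isIn s (PySem.Str.lower link)) ghHosts ngHints
  rw [← patternsB_eq] at h
  simp only [ghB, ngB]
  cases hf : patternsB.find? (fun pb => PySem.Str.isIn pb.1 (PySem.Str.lower link)) with
  | none =>
    rw [hf] at h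
    simp only [Option.map_none] at h
    split_ifs at h with hg hn
    · rw [if_neg hg, if_neg hn]
  | some pb =>
    obtain ⟨s, b⟩ := pb
    rw [hf] at h
    simp only [Option.map_some] at h
    split_ifs at h with hg hn <;> simp only [Option.some.injEq] at h <;> subst h
    · rw [if_pos hg]
      simp
    · rw [if_neg hg, if_pos hn]
      simp

-- A's per-link step, with the tests named
theorem stepA_eq :
    (fun (acc : List String × List String) link =>
      let lower := PySem.Str.lower link
      if ghHosts.any (fun host => PySem.Str.isIn host lower) then (acc.1 ++ [link], acc.2)
      else if ngHints.any (fun hint => PySem.Str.isIn hint lower) then (acc.1, acc.2 ++ [link])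
      else acc)
    = (fun (acc : List String × List String) link =>
      if ghB link then (acc.1 ++ [link], acc.2)
      else if ngB link then (acc.1, acc.2 ++ [link])
      else acc) := rfl

-- A's accumulator loop is two filters
theorem foldA_eq (links : List String) (a b : List String) :
    links.foldl (fun (acc : List String × List String) link =>
      if ghB link then (acc.1 ++ [link], acc.2)
      else if ngB link then (acc.1, acc.2 ++ [link])
      else acc) (a, b)
    = (a ++ links.filter ghB,
       b ++ links.filter (fun l => !ghB l && ngB l)) := by
  induction links generalizing a b with
  | nil => simp
  | cons x xs ih =>
    simp only [List.foldl_cons, List.filter_cons]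
    cases hg : ghB x <;> cases hn : ngB x <;>
      simp [hg, hn, ih, List.append_assoc]

-- B's loop is the insort-fold of the same two filters
theorem foldB_eq (links : List String) (a b : List String) :
    links.foldl (fun (buckets : List String × List String) link =>
      if ghB link then (insortUnique buckets.1 link, buckets.2)
      else if ngB link then (buckets.1, insortUnique buckets.2 link)
      else buckets) (a, b)
    = ((links.filter ghB).foldl insortUnique a,
       (links.filter (fun l => !ghB l && ngB l)).foldl insortUnique b) := by
  induction links generalizing a b with
  | nil => simp
  | cons x xs ih =>
    simp only [List.foldl_cons, List.filter_cons]
    cases hg : ghB x <;> cases hn : ngB x <;> simp [hg, hn, ih]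

theorem mem_insortUnique (xs : List String) (x a : String) :
    a ∈ insortUnique xs x ↔ a = x ∨ a ∈ xs := by
  induction xs with
  | nil => simp [insortUnique]
  | cons y ys ih =>
    simp only [insortUnique]
    split_ifs with h1 h2 <;> simp_all <;> tauto

theorem pairwise_insortUnique (xs : List String) (x : String)
    (h : xs.Pairwise (· < ·)) : (insortUnique xs x).Pairwise (· < ·) := by
  induction xs with
  | nil => simp [insortUnique]
  | cons y ys ih =>
    simp only [insortUnique]
    rcases List.pairwise_cons.mp h with ⟨hy, hys⟩
    split_ifs with h1 h2
    · refine List.pairwise_cons.mpr ⟨?_, ih hys⟩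
      intro b hb
      rcases (mem_insortUnique ys x b).mp hb with rfl | hb
      · exact h1
      · exact hy b hb
    · have hx : x < y := lt_of_le_of_ne (le_of_not_gt h1) (Ne.symm h2)
      refine List.pairwise_cons.mpr ⟨?_, h⟩
      intro b hb
      rcases List.mem_cons.mp hb with rfl | hb
      · exact hx
      · exact lt_trans hx (hy b hb)
    · exact h

theorem pairwise_foldl_insort (links : List String) (acc : List String)
    (h : acc.Pairwise (· < ·)) : (links.foldl insortUnique acc).Pairwise (· < ·) := by
  induction links generalizing acc with
  | nil => exact h
  | cons x xs ih => exact ih _ (pairwise_insortUnique _ _ h)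

theorem mem_foldl_insort (links : List String) (acc : List String) (a : String) :
    a ∈ links.foldl insortUnique acc ↔ a ∈ acc ∨ a ∈ links := by
  induction links generalizing acc with
  | nil => simp
  | cons x xs ih =>
    simp only [List.foldl_cons, ih, mem_insortUnique, List.mem_cons]
    tauto

-- sorted(set(xs)) equals the insort-fold of xs
theorem sorted_ofList_eq_foldl_insort (xs : List String) :
    PySem.List.sorted (PySem.Set.ofList xs) (fun x => x) false
      = xs.foldl insortUnique [] := by
  apply PySem.List.sorted_eq_of_perm_of_pairwise_lt
  · rw [List.perm_ext_iff_of_nodup]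
    · intro a
      simp [mem_foldl_insort, PySem.Set.mem_ofList]
    · exact (pairwise_foldl_insort xs [] (by simp)).imp ne_of_lt
    · exact PySem.Set.nodup_ofList _
  · exact pairwise_foldl_insort xs [] (by simp)

-- ===== VERDICT (by name: the statement is the Claim_ definition above) =====
theorem classify_links_spec : Claim_equal_classify_links := by
  intro links _
  unfold Spec_classify_links classify_links classify_links_alt
  rw [stepB_eq, foldB_eq, stepA_eq, foldA_eq]
  simp only [List.nil_append]
  rw [sorted_ofList_eq_foldl_insort, sorted_ofList_eq_foldl_insort]
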